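-- pv_equiv track=rewrite | github.com/polacheck/HW5 | HW5.py | findNextOpr
-- ===== SOURCE A (Python) =====
-- def findNextOpr(txt):
--     """
--         >>> findNextOpr('  3*   4 - 5')
--         3
--         >>> findNextOpr('8   4 - 5')
--         6
--         >>> findNextOpr('89 4 5')
--         -1
--     """
--     if not isinstance(txt,str) or len(txt)<=0:
--         return "error: findNextOpr"
--
--     # --- YOU CODE STARTS HERE
--     txtlist = []
--     count = 0
--     count2 = 0
--     breaker = 0
--     while count < len(txt):
--         txtlist.append(txt[count])
--         count = count + 1
--     try:
--         while breaker != 1: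
--              if txtlist[count2] == '+' or txtlist[count2] == '-' or txtlist[count2] == '*' or txtlist[count2] == '/' or txtlist[count2] == '^':
--                  breaker = 1
--                  position = count2
--              count2 = count2 + 1
--     except IndexError:
--         position = -1
--     if breaker == 0:
--         position = -1
--     return(position)
-- ===== SOURCE B (Python) =====
-- def findNextOpr(txt):
--     if not isinstance(txt, str) or len(txt) <= 0:
--         return "error: findNextOpr"
--     positions = [p for p in (txt.find(c) for c in '+-*/^') if p >= 0]
--     return min(positions) if positions else -1
-- ===== Notes on version B (the rewrite author's own statement) =====
-- stated objective: simpler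
-- what changed: Replaces A's manual char-copy loop plus index scan guarded by try/except IndexError with five str.find library scans (one per operator) combined by min over the nonnegative results.
-- outside the precondition, e.g. on findNextOpr(''): A returns 'error: findNextOpr', B returns 'error: findNextOpr'
import Mathlib
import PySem

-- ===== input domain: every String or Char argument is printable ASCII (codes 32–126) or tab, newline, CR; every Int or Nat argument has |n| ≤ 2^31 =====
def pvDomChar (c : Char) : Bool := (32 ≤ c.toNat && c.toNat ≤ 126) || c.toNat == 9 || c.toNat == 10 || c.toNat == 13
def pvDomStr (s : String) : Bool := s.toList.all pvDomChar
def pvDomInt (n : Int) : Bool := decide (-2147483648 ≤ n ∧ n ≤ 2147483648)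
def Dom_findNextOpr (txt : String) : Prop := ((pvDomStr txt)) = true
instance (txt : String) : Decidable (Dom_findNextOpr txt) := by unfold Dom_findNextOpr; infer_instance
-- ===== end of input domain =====

-- B replaces A's char-copy loop and manual index scan (try/except IndexError) with five str.find
-- scans combined by min over the nonnegative results; objective: simpler.

-- ===== PORT A =====
-- first while loop: txtlist.append(txt[count]) while count < len(txt)
def pvCopy (txt : List Char) (count : Nat) : List Char :=
  if h : count < txt.length then txt[count] :: pvCopy txt (count + 1) else []
termination_by txt.length - count

-- second while loop: test txtlist[count2]; IndexError (pyGet? = none) gives position = -1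
def pvScan (txtlist : List Char) (count2 : Nat) : Int :=
  match h : PySem.List.pyGet? txtlist (count2 : Int) with
  | none => -1
  | some ch =>
      if ch = '+' ∨ ch = '-' ∨ ch = '*' ∨ ch = '/' ∨ ch = '^' then (count2 : Int)
      else pvScan txtlist (count2 + 1)
termination_by txtlist.length - count2
decreasing_by
  rw [PySem.List.pyGet?_natCast] at h
  obtain ⟨hlt, -⟩ := List.getElem?_eq_some_iff.mp h
  omega

def findNextOpr (txt : String) : Int :=
  pvScan (pvCopy txt.toList 0) 0

-- ===== PORT B =====
def findNextOpr_alt (txt : String) : Int :=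
  let positions :=
    ((['+', '-', '*', '/', '^'].map (fun c => PySem.Str.find txt (String.ofList [c]))).filter
      (fun p => decide (0 ≤ p)))
  match PySem.List.min? positions (fun p => p) with
  | some m => m
  | none => -1

-- ===== PRECONDITION & SPEC =====
-- Pre_ excludes only the empty string, on which A returns an error string instead of an int.
def Pre_findNextOpr (txt : String) : Prop := txt ≠ ""
instance (txt : String) : Decidable (Pre_findNextOpr txt) := by unfold Pre_findNextOpr; infer_instance
def pvWitness_findNextOpr : String := "  3*   4 - 5"

def Spec_findNextOpr (txt : String) (out : Int) : Prop := out = findNextOpr_alt txt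
instance (txt : String) (out : Int) : Decidable (Spec_findNextOpr txt out) := by unfold Spec_findNextOpr; infer_instance

-- ===== CLAIM (what is proved, stated in full; the proofs are below) =====
def Claim_equal_findNextOpr : Prop := ∀ (txt : String), Dom_findNextOpr txt → Pre_findNextOpr txt → Spec_findNextOpr txt (findNextOpr txt)

-- ===== LEMMAS AND PROOFS =====

-- the operator predicate both programs test
def pvOpP (c : Char) : Bool := c = '+' || c = '-' || c = '*' || c = '/' || c = '^'

-- the common specification value: index of the first operator char, else -1
def pvFirstOp (l : List Char) : Int :=
  match l.findIdx? pvOpP with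
  | some n => (n : Int)
  | none => -1

lemma pvOpP_iff (c : Char) : pvOpP c = true ↔ c ∈ ['+', '-', '*', '/', '^'] := by
  simp [pvOpP, or_assoc]

lemma pvSingleton_prefix (c : Char) (d : List Char) : [c] <+: d ↔ d.head? = some c := by
  cases d <;> simp [List.cons_prefix_cons, eq_comm]

lemma pvPrefix_drop (c : Char) (l : List Char) (m : Nat) :
    [c] <+: l.drop m ↔ l[m]? = some c := by
  rw [pvSingleton_prefix, List.head?_drop]

lemma pvCopy_eq_drop (l : List Char) (i : Nat) : pvCopy l i = l.drop i := by
  rw [pvCopy]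
  split
  · rw [pvCopy_eq_drop l (i + 1)]
    exact (List.drop_eq_getElem_cons ‹_›).symm
  · rw [List.drop_eq_nil_of_le (by omega)]
termination_by l.length - i

lemma pvScan_eq (l : List Char) (i : Nat) :
    pvScan l i =
      match (l.drop i).findIdx? pvOpP with
      | some n => ((i + n : Nat) : Int)
      | none => -1 := by
  rw [pvScan]
  split
  · rename_i h
    rw [PySem.List.pyGet?_natCast] at h
    have hle : l.length ≤ i := List.getElem?_eq_none_iff.mp h
    rw [List.drop_eq_nil_of_le hle]
    rfl
  · rename_i ch h
    rw [PySem.List.pyGet?_natCast] at h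
    obtain ⟨hlt, rfl⟩ := List.getElem?_eq_some_iff.mp h
    rw [List.drop_eq_getElem_cons hlt, List.findIdx?_cons]
    by_cases hop : pvOpP l[i] = true
    · rw [if_pos (by simpa [pvOpP, or_assoc] using hop), if_pos hop]
      simp
    · rw [if_neg (by simpa [pvOpP, or_assoc] using hop), if_neg hop]
      rw [pvScan_eq l (i + 1)]
      cases hrest : (l.drop (i + 1)).findIdx? pvOpP with
      | none => rfl
      | some n =>
        show ((i + 1 + n : Nat) : Int) = ((i + (n + 1) : Nat) : Int)
        omega
termination_by l.length - i
decreasing_by omega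

lemma findNextOpr_eq_firstOp (txt : String) : findNextOpr txt = pvFirstOp txt.toList := by
  rw [findNextOpr, pvCopy_eq_drop, List.drop_zero, pvScan_eq, pvFirstOp]
  cases h : txt.toList.findIdx? pvOpP <;> simp [h]

lemma pvFind_first (l : List Char) (c : Char) (n : Nat)
    (hn : n < l.length) (hc : l[n] = c) (hfirst : ∀ j, (hj : j < l.length) → j < n → l[j] ≠ c) :
    PySem.Chars.find l [c] = (n : Int) := by
  have hmem : c ∈ l := hc ▸ List.getElem_mem hn
  have hnn : 0 ≤ PySem.Chars.find l [c] :=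
    (PySem.Chars.find_nonneg_iff l [c]).mpr ((List.singleton_infix_iff c l).mpr hmem)
  obtain ⟨hpre, hmin⟩ := PySem.Chars.find_spec hnn
  rw [pvPrefix_drop] at hpre
  obtain ⟨hklt, hkc⟩ := List.getElem?_eq_some_iff.mp hpre
  have h1 : n ≤ (PySem.Chars.find l [c]).toNat := by
    by_contra hlt'
    exact hfirst _ hklt (by omega) hkc
  have h2 : (PySem.Chars.find l [c]).toNat ≤ n := by
    by_contra hlt'
    exact hmin n (by omega) ((pvPrefix_drop c l n).mpr (by rw [List.getElem?_eq_some_iff]; exact ⟨hn, hc⟩))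
  omega

lemma pvFind_ge (l : List Char) (c : Char) (n : Nat)
    (hmin : ∀ j, (hj : j < l.length) → j < n → pvOpP l[j] = false)
    (hc : pvOpP c = true) (hpos : 0 ≤ PySem.Chars.find l [c]) :
    (n : Int) ≤ PySem.Chars.find l [c] := by
  obtain ⟨hpre, -⟩ := PySem.Chars.find_spec hpos
  rw [pvPrefix_drop] at hpre
  obtain ⟨hklt, hkc⟩ := List.getElem?_eq_some_iff.mp hpre
  by_contra hlt'
  have : pvOpP l[(PySem.Chars.find l [c]).toNat] = false := hmin _ hklt (by omega)
  rw [hkc, hc] at this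
  simp at this

lemma findNextOpr_alt_eq_firstOp (txt : String) : findNextOpr_alt txt = pvFirstOp txt.toList := by
  rw [findNextOpr_alt, pvFirstOp]
  simp only [PySem.Str.find_eq, String.toList_ofList]
  cases h : txt.toList.findIdx? pvOpP with
  | none =>
    have hnone : ∀ x ∈ txt.toList, pvOpP x = false := List.findIdx?_eq_none_iff.mp h
    have hfilter :
        ((['+', '-', '*', '/', '^'].map (fun c => PySem.Chars.find txt.toList [c])).filter
          (fun p => decide (0 ≤ p))) = [] := by
      rw [List.filter_eq_nil_iff]
      intro a ha
      obtain ⟨c, hc, rfl⟩ := List.mem_map.mp ha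
      have : PySem.Chars.find txt.toList [c] = -1 := by
        rw [PySem.Chars.find_eq_neg_one_iff, List.singleton_infix_iff]
        intro hmem
        have := hnone c hmem
        rw [(pvOpP_iff c).mpr hc] at this
        simp at this
      simp [this]
    rw [hfilter]
    rfl
  | some n =>
    obtain ⟨hlt, hpn, hminn⟩ := List.findIdx?_eq_some_iff_getElem.mp h
    have hminn' : ∀ j, (hj : j < txt.toList.length) → j < n → pvOpP txt.toList[j] = false := by
      intro j hj hjn
      exact Bool.not_eq_true _ ▸ hminn j hjn
    have hc0 : txt.toList[n] ∈ ['+', '-', '*', '/', '^'] := (pvOpP_iff _).mp hpn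
    have hF0 : PySem.Chars.find txt.toList [txt.toList[n]] = (n : Int) := by
      apply pvFind_first _ _ _ hlt rfl
      intro j hj hjn heq
      have := hminn' j hj hjn
      rw [heq, hpn] at this
      simp at this
    have hnpos : (n : Int) ∈
        ((['+', '-', '*', '/', '^'].map (fun c => PySem.Chars.find txt.toList [c])).filter
          (fun p => decide (0 ≤ p))) := by
      rw [List.mem_filter]
      exact ⟨List.mem_map.mpr ⟨txt.toList[n], hc0, hF0⟩, by simp⟩
    cases hmq : PySem.List.min?
        ((['+', '-', '*', '/', '^'].map (fun c => PySem.Chars.find txt.toList [c])).filter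
          (fun p => decide (0 ≤ p))) (fun p => p) with
    | none =>
      rw [(PySem.List.min?_eq_none_iff _ _).mp hmq] at hnpos
      exact absurd hnpos (List.not_mem_nil)
    | some m =>
      have hmmem := PySem.List.min?_mem hmq
      rw [List.mem_filter] at hmmem
      obtain ⟨hmmap, hm0⟩ := hmmem
      obtain ⟨c, hc, hFc⟩ := List.mem_map.mp hmmap
      have hge : (n : Int) ≤ m := by
        rw [← hFc]
        exact pvFind_ge _ _ _ hminn' ((pvOpP_iff c).mpr hc) (by rw [hFc]; exact of_decide_eq_true hm0)
      have hle : m ≤ (n : Int) := PySem.List.min?_isMin hmq _ hnpos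
      simpa using le_antisymm hle hge

-- ===== VERDICT (by name: the statement is the Claim_ definition above) =====
theorem findNextOpr_spec : Claim_equal_findNextOpr := by
  intro txt _ _
  unfold Spec_findNextOpr
  rw [findNextOpr_eq_firstOp, findNextOpr_alt_eq_firstOp]
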